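-- pv_equiv track=rewrite | github.com/mzq24/MAGDP_mzq | test_pool.py | complex_cpu_bound_task
-- ===== SOURCE A (Python) =====
-- def complex_cpu_bound_task(x):
--     # Perform some complex CPU-bound computation
--     result = 0
--     for i in range(x):
--         for j in range(x):
--             for k in range(x):
--                 for kk in range(x):
--                     result += i * j * k * kk
--     return result
-- ===== SOURCE B (Python) =====
-- def complex_cpu_bound_task(x):
--     # Closed form: sum factorizes into (sum of range(x))**4; 0+1+...+(x-1) = x*(x-1)//2.
--     t = x * (x - 1) // 2 if x > 0 else 0
--     return t * t * t * t
-- ===== Notes on version B (the rewrite author's own statement) =====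
-- stated objective: faster
-- what changed: Replaces the quadruple nested loop by a closed form: the sum factorizes into identical Gauss sums, one per loop, so B returns the fourth power of x*(x-1)//2.
import Mathlib
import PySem

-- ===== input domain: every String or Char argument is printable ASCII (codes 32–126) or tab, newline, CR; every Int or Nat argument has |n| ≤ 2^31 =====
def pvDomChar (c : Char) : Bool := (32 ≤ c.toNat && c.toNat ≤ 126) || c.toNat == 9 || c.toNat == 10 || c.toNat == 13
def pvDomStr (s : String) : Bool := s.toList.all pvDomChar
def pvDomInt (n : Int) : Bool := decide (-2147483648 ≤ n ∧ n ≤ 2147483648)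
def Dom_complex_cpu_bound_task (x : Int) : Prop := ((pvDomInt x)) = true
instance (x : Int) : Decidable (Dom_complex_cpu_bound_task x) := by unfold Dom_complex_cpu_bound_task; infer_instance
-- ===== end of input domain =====

-- B replaces A's quadruple nested loop by a closed form (the sum factorizes into identical Gauss sums), which a timing run measured as much faster.

-- ===== PORT A =====
def complex_cpu_bound_task (x : Int) : Int :=
  (PySem.List.pyRange 0 x 1).foldl (fun r i =>
    (PySem.List.pyRange 0 x 1).foldl (fun r j =>
      (PySem.List.pyRange 0 x 1).foldl (fun r k =>
        (PySem.List.pyRange 0 x 1).foldl (fun r kk => r + i * j * k * kk) r) r) r) 0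

-- ===== PORT B =====
def complex_cpu_bound_task_alt (x : Int) : Int :=
  let t : Int := if x > 0 then PySem.Int.floordiv (x * (x - 1)) 2 else 0
  t * t * t * t

-- ===== PRECONDITION & SPEC =====
def Spec_complex_cpu_bound_task (x : Int) (out : Int) : Prop := out = complex_cpu_bound_task_alt x
instance (x : Int) (out : Int) : Decidable (Spec_complex_cpu_bound_task x out) := by unfold Spec_complex_cpu_bound_task; infer_instance

-- ===== CLAIM (what is proved, stated in full; the proofs are below) =====
def Claim_equal_complex_cpu_bound_task : Prop := ∀ (x : Int), Dom_complex_cpu_bound_task x → Spec_complex_cpu_bound_task x (complex_cpu_bound_task x)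

-- ===== LEMMAS AND PROOFS =====

-- a foldl that only adds c*v is a linear map of the list sum
theorem pv_foldl_linear (c : Int) (l : List Int) (a : Int) :
    l.foldl (fun r v => r + c * v) a = a + c * l.sum := by
  induction l generalizing a with
  | nil => simp
  | cons h t ih => simp [List.foldl, ih]; ring

theorem pv_sum_range_two (x : Int) :
    (PySem.List.pyRange 0 x 1).sum * 2 = if x > 0 then x * (x - 1) else 0 := by
  by_cases h : 0 < x
  case neg =>
    rw [PySem.List.pyRange_one_eq_nil (by omega)]
    simp [h]
  case pos =>
    simp only [if_pos h]
    obtain ⟨n, rfl⟩ : ∃ n : Nat, x = (n : Int) := ⟨x.toNat, (Int.toNat_of_nonneg h.le).symm⟩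
    induction n with
    | zero => simp at h
    | succ m ih =>
      rcases Nat.eq_zero_or_pos m with rfl | hm
      · have h1 : ((0 + 1 : Nat) : Int) = 0 + 1 := by norm_num
        rw [h1, PySem.List.pyRange_one_singleton]
        simp
      · have hm' : (0:Int) < m := by exact_mod_cast hm
        have := ih hm'
        rw [show ((m+1 : Nat) : Int) = (m : Int) + 1 by push_cast; ring,
            PySem.List.pyRange_one_succ_right (by exact_mod_cast hm.le)]
        simp only [List.sum_append, List.sum_cons, List.sum_nil]
        nlinarith [this]

theorem pv_sum_range_eq (x : Int) :
    (PySem.List.pyRange 0 x 1).sum =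
      (if x > 0 then PySem.Int.floordiv (x * (x - 1)) 2 else 0) := by
  have h2 := pv_sum_range_two x
  split_ifs with h
  · rw [if_pos h] at h2
    rw [← h2, PySem.Int.floordiv_eq_ediv_of_pos (by norm_num)]
    omega
  · rw [if_neg h] at h2
    omega

-- ===== VERDICT (by name: the statement is the Claim_ definition above) =====
theorem complex_cpu_bound_task_spec : Claim_equal_complex_cpu_bound_task := by
  intro x _
  unfold Spec_complex_cpu_bound_task complex_cpu_bound_task complex_cpu_bound_task_alt
  set S := (PySem.List.pyRange 0 x 1).sum with hS
  have h4 : ∀ (i j k r : Int),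
      (PySem.List.pyRange 0 x 1).foldl (fun r kk => r + i * j * k * kk) r = r + i * j * k * S := by
    intro i j k r
    simpa [mul_assoc] using pv_foldl_linear (i * j * k) (PySem.List.pyRange 0 x 1) r
  have h3 : ∀ (i j r : Int),
      (PySem.List.pyRange 0 x 1).foldl (fun r k =>
        (PySem.List.pyRange 0 x 1).foldl (fun r kk => r + i * j * k * kk) r) r
        = r + i * j * S * S := by
    intro i j r
    rw [PySem.List.foldl_congr_mem _ _ (fun r k => r + (i * j * S) * k) r
        (fun acc k _ => by rw [h4]; ring), pv_foldl_linear]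
  have h2 : ∀ (i r : Int),
      (PySem.List.pyRange 0 x 1).foldl (fun r j =>
        (PySem.List.pyRange 0 x 1).foldl (fun r k =>
          (PySem.List.pyRange 0 x 1).foldl (fun r kk => r + i * j * k * kk) r) r) r
        = r + i * S * S * S := by
    intro i r
    rw [PySem.List.foldl_congr_mem _ _ (fun r j => r + (i * S * S) * j) r
        (fun acc j _ => by rw [h3]; ring), pv_foldl_linear]
  have h1 : (PySem.List.pyRange 0 x 1).foldl (fun r i =>
      (PySem.List.pyRange 0 x 1).foldl (fun r j =>
        (PySem.List.pyRange 0 x 1).foldl (fun r k =>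
          (PySem.List.pyRange 0 x 1).foldl (fun r kk => r + i * j * k * kk) r) r) r) 0
      = S * S * S * S := by
    rw [PySem.List.foldl_congr_mem _ _ (fun r i => r + (S * S * S) * i) 0
        (fun acc i _ => by rw [h2]; ring), pv_foldl_linear]
    ring
  rw [h1, ← pv_sum_range_eq]
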